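-- pv_equiv track=rewrite | github.com/Olivera2708/Codeforces | #903/treci.py | slova
-- ===== SOURCE A (Python) =====
-- def slova(n):
--     minus = 1
--     ukupno = 0
--     while True:
--         if (n - minus > 0):
--             ukupno += n - minus
--             minus += 2
--         else:
--             return ukupno
-- ===== SOURCE B (Python) =====
-- def slova(n):
--     if n <= 0:
--         return 0
--     k = n // 2
--     return k * n - k * k
-- ===== Notes on version B (the rewrite author's own statement) =====
-- stated objective: faster
-- what changed: Replaces the step-by-two summation loop with the closed-form arithmetic-series formula: the count k of positive terms is half of n, and the sum is k*n minus k squared.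
import Mathlib
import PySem

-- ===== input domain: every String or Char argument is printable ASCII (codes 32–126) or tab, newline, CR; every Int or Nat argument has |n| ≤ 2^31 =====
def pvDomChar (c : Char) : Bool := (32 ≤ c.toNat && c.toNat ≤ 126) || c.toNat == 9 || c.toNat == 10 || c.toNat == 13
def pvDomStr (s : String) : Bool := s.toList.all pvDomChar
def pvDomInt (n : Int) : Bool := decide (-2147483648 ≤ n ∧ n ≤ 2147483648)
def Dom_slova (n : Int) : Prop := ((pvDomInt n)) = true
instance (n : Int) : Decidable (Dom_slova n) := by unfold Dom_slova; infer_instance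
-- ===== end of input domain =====

-- B replaces A's step-by-2 summation loop with the closed-form k*n - k^2, k = n//2 (objective: faster).

-- ===== PORT A =====
-- the 'while True' loop of A: state (minus, ukupno); terminates because n - minus strictly decreases
def slovaLoop (n minus ukupno : Int) : Int :=
  if n - minus > 0 then slovaLoop n (minus + 2) (ukupno + (n - minus))
  else ukupno
termination_by (n - minus).toNat
decreasing_by omega

def slova (n : Int) : Int := slovaLoop n 1 0

-- ===== PORT B =====
def slova_alt (n : Int) : Int :=
  if n ≤ 0 then 0
  else
    let k := PySem.Int.floordiv n 2
    k * n - k * k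

-- ===== PRECONDITION & SPEC =====
def Spec_slova (n : Int) (out : Int) : Prop := out = slova_alt n
instance (n : Int) (out : Int) : Decidable (Spec_slova n out) := by unfold Spec_slova; infer_instance

-- ===== CLAIM (what is proved, stated in full; the proofs are below) =====
def Claim_equal_slova : Prop := ∀ (n : Int), Dom_slova n → Spec_slova n (slova n)

-- ===== LEMMAS AND PROOFS =====

-- closed form of the remaining sum, as a function of d = n - minus
def pvG (d : Int) : Int := if d > 0 then ((d - 1) / 2 + 1) * d - ((d - 1) / 2 + 1) * ((d - 1) / 2) else 0

theorem pvG_rec (d : Int) (hd : d > 0) : pvG d = d + pvG (d - 2) := by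
  unfold pvG
  by_cases h2 : d - 2 > 0
  · rw [if_pos hd, if_pos h2]
    have hj : (d - 1) / 2 = (d - 2 - 1) / 2 + 1 := by omega
    rw [hj]; ring
  · rw [if_pos hd, if_neg h2]
    have h1 : d = 1 ∨ d = 2 := by omega
    rcases h1 with h | h <;> subst h <;> decide

theorem slovaLoop_eq (m : Nat) : ∀ (n minus uk : Int), n - minus ≤ m →
    slovaLoop n minus uk = uk + pvG (n - minus) := by
  induction m with
  | zero =>
    intro n minus uk h
    rw [slovaLoop]
    have hnp : ¬ (n - minus > 0) := by omega
    rw [if_neg hnp]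
    unfold pvG
    rw [if_neg hnp]
    ring
  | succ m ih =>
    intro n minus uk h
    rw [slovaLoop]
    by_cases hp : n - minus > 0
    · rw [if_pos hp]
      rw [ih n (minus + 2) _ (by omega), pvG_rec _ hp]
      have hd : n - (minus + 2) = n - minus - 2 := by ring
      rw [hd]; ring
    · rw [if_neg hp]
      unfold pvG
      rw [if_neg hp]
      ring

-- ===== VERDICT (by name: the statement is the Claim_ definition above) =====
theorem slova_spec : Claim_equal_slova := by
  intro n _
  unfold Spec_slova slova slova_alt
  rw [slovaLoop_eq (n - 1).toNat n 1 0 (by omega)]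
  by_cases hn : n ≤ 0
  · have h2 : ¬ (n - 1 > 0) := by omega
    rw [if_pos hn]
    unfold pvG
    rw [if_neg h2]
    ring
  · rw [if_neg hn]
    rw [PySem.Int.floordiv_eq_ediv_of_pos (by omega)]
    unfold pvG
    by_cases h1 : n - 1 > 0
    · rw [if_pos h1]
      have hj : (n - 1 - 1) / 2 = n / 2 - 1 := by omega
      rw [hj]; ring
    · have hn1 : n = 1 := by omega
      subst hn1; decide
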